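-- pv_equiv track=rewrite | github.com/Vilcius/constraint_gadgets | core/resource_estimation.py | _cnt_fredkin_stair
-- ===== SOURCE A (Python) =====
-- from typing import Dict, List, Tuple
--
-- def _cnt_fredkin_stair(ka: int, kb: int) -> Dict[str, int]:
--     """Gates for _fredkin_stair with reg_a size ka, reg_b size kb."""
--     cnot = cswap = 0
--     const = 1
--     if ka == kb:
--         cnot += 1
--         const = 2
--     for i in range(kb - const, -1, -1):
--         for _ in range(i, ka - 1):
--             cswap += 1
--         cnot += 1
--     return {"CNOT": cnot, "CSWAP": cswap}
-- ===== SOURCE B (Python) =====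
-- def _cnt_fredkin_stair(ka: int, kb: int):
--     """Closed-form gate counts for _fredkin_stair (constant time, no loops)."""
--     eq = ka == kb
--     n = max(kb - (2 if eq else 1) + 1, 0)   # number of outer-loop iterations
--     hi = max(ka - 1, 0)                     # largest CSWAP term
--     lo = max(ka - 1 - n, 0)                 # terms below this are clamped away
--     cswap = hi * (hi + 1) // 2 - lo * (lo + 1) // 2
--     return {"CNOT": (1 if eq else 0) + n, "CSWAP": cswap}
-- ===== Notes on version B (the rewrite author's own statement) =====
-- stated objective: faster
-- what changed: Replaced the nested counting loops by a closed-form triangular-number formula with clamping, computed in constant time.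
import Mathlib
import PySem

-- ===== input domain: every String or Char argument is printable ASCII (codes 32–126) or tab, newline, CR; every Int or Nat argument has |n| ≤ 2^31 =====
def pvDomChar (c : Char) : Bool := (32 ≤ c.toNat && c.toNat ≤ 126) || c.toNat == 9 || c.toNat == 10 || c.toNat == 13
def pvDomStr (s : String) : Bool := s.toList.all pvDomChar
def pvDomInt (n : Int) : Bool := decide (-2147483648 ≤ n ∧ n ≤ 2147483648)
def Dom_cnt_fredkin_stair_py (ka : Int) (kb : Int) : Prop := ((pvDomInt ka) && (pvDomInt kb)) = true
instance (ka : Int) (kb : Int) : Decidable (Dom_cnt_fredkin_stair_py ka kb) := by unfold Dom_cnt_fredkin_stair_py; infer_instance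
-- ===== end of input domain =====

-- B replaces A's nested counting loops by a closed-form triangular-number formula (constant time).


-- ===== PORT A =====
-- stepA is the body of A's outer for-loop (inner loop = the foldl over range(i, ka-1))
def stepA (ka : Int) (p : Int × Int) (i : Int) : Int × Int :=
  (p.1 + 1, (PySem.List.pyRange i (ka - 1) 1).foldl (fun c _ => c + 1) p.2)

-- literal transliteration: cnot/cswap accumulated by the nested for-loops over ranges
def cnt_fredkin_stair_py (ka : Int) (kb : Int) : List (String × Int) :=
  let cnot0 : Int := if ka == kb then 0 + 1 else 0
  let const : Int := if ka == kb then 2 else 1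
  let st := (PySem.List.pyRange (kb - const) (-1) (-1)).foldl (stepA ka) (cnot0, 0)
  [("CNOT", st.1), ("CSWAP", st.2)]

-- ===== PORT B =====
def cnt_fredkin_stair_py_alt (ka : Int) (kb : Int) : List (String × Int) :=
  let eq := ka == kb
  let n : Int := max (kb - (if eq then 2 else 1) + 1) 0
  let hi : Int := max (ka - 1) 0
  let lo : Int := max (ka - 1 - n) 0
  let cswap := PySem.Int.floordiv (hi * (hi + 1)) 2 - PySem.Int.floordiv (lo * (lo + 1)) 2
  [("CNOT", (if eq then 1 else 0) + n), ("CSWAP", cswap)]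

-- ===== PRECONDITION & SPEC =====
def Spec_cnt_fredkin_stair_py (ka : Int) (kb : Int) (out : List (String × Int)) : Prop := out = cnt_fredkin_stair_py_alt ka kb
instance (ka : Int) (kb : Int) (out : List (String × Int)) : Decidable (Spec_cnt_fredkin_stair_py ka kb out) := by unfold Spec_cnt_fredkin_stair_py; infer_instance

-- ===== CLAIM (what is proved, stated in full; the proofs are below) =====
def Claim_equal_cnt_fredkin_stair_py : Prop := ∀ (ka : Int) (kb : Int), Dom_cnt_fredkin_stair_py ka kb → Spec_cnt_fredkin_stair_py ka kb (cnt_fredkin_stair_py ka kb)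

-- ===== LEMMAS AND PROOFS =====

/-- Triangular numbers, recursively. -/
def tri : Nat → Nat
  | 0 => 0
  | k + 1 => tri k + (k + 1)

theorem two_mul_tri (k : Nat) : 2 * tri k = k * (k + 1) := by
  induction k with
  | zero => rfl
  | succ k ih =>
    rw [show tri (k + 1) = tri k + (k + 1) from rfl, Nat.mul_add, ih]; ring

theorem tri_mono {a b : Nat} (h : a ≤ b) : tri a ≤ tri b := by
  induction b with
  | zero => simp [Nat.le_zero.mp h]
  | succ b ih =>
    rcases Nat.lt_or_ge a (b + 1) with h' | h'
    · exact le_trans (ih (Nat.lt_succ_iff.mp h')) (by simp [tri])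
    · have : a = b + 1 := le_antisymm h h'
      simp [this]

theorem floordiv_tri (k : Nat) :
    PySem.Int.floordiv ((k : Int) * ((k : Int) + 1)) 2 = (tri k : Int) := by
  rw [PySem.Int.floordiv_eq_ediv_of_pos (by norm_num)]
  have h : (k : Int) * ((k : Int) + 1) = 2 * (tri k : Int) := by
    exact_mod_cast (two_mul_tri k).symm
  rw [h]
  exact Int.mul_ediv_cancel_left _ (by norm_num)

/-- Stepping the clamped partial triangular sum. -/
theorem tri_step (t n : Nat) :
    (t - n) + (tri t - tri (t - n)) = tri t - tri (t - (n + 1)) := by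
  rcases Nat.lt_or_ge n t with h | h
  · have h1 : t - n = (t - (n + 1)) + 1 := by omega
    have h2 : tri (t - n) = tri (t - (n + 1)) + (t - n) := by
      rw [h1]; rfl
    have m1 := tri_mono (Nat.sub_le t n)
    have m2 := tri_mono (Nat.sub_le t (n + 1))
    omega
  · have h1 : t - n = 0 := by omega
    have h2 : t - (n + 1) = 0 := by omega
    simp [h1, h2, tri]

theorem stepA_eval (ka : Int) (c s i : Int) :
    stepA ka (c, s) i = (c + 1, s + ((ka - 1 - i).toNat : Int)) := by
  simp [stepA, PySem.List.foldl_add, PySem.List.length_pyRange_one]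

/-- A's nested loop, evaluated: n outer iterations, CSWAP total is a
    difference of triangular numbers. -/
theorem loop_eval (ka : Int) (t : Nat) (ht : t = (ka - 1).toNat) :
    ∀ (n : Nat) (c s : Int),
      (PySem.List.pyRange ((n : Int) - 1) (-1) (-1)).foldl (stepA ka) (c, s)
      = (c + n, s + ((tri t - tri (t - n) : Nat) : Int)) := by
  intro n
  induction n with
  | zero =>
    intro c s
    rw [PySem.List.pyRange_neg_one_eq_nil (by norm_num)]
    simp
  | succ n ih =>
    intro c s
    have hcons : PySem.List.pyRange (((n + 1 : Nat) : Int) - 1) (-1) (-1)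
        = ((n : Int)) :: PySem.List.pyRange ((n : Int) - 1) (-1) (-1) := by
      have h1 : (((n + 1 : Nat) : Int) - 1) = (n : Int) := by push_cast; ring
      rw [h1, PySem.List.pyRange_neg_one_cons (by omega)]
    rw [hcons, List.foldl_cons, stepA_eval, ih]
    have h1 : (ka - 1 - (n : Int)).toNat = t - n := by omega
    have h2 := tri_step t n
    have m1 := tri_mono (Nat.sub_le t n)
    have m2 := tri_mono (Nat.sub_le t (n + 1))
    rw [h1]
    simp only [Prod.mk.injEq]
    exact ⟨by push_cast; ring, by omega⟩

/-- A's whole loop for an arbitrary `const`/initial CNOT count equals B's closed form. -/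
theorem core (ka m cnot0 : Int) :
    (PySem.List.pyRange m (-1) (-1)).foldl (stepA ka) (cnot0, 0)
      = (cnot0 + max (m + 1) 0,
         PySem.Int.floordiv (max (ka - 1) 0 * (max (ka - 1) 0 + 1)) 2
           - PySem.Int.floordiv (max (ka - 1 - max (m + 1) 0) 0
               * (max (ka - 1 - max (m + 1) 0) 0 + 1)) 2) := by
  set t : Nat := (ka - 1).toNat with ht
  set N : Nat := (m + 1).toNat with hN
  have hNc : (N : Int) = max (m + 1) 0 := by omega
  have hrange : PySem.List.pyRange m (-1) (-1)
      = PySem.List.pyRange ((N : Int) - 1) (-1) (-1) := by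
    by_cases h : m + 1 ≤ 0
    · have h0 : N = 0 := by omega
      rw [h0, PySem.List.pyRange_neg_one_eq_nil (by omega),
          PySem.List.pyRange_neg_one_eq_nil (by norm_num)]
    · congr 1
      omega
  rw [hrange, loop_eval ka t ht N]
  have hhi : max (ka - 1) 0 = (t : Int) := by omega
  have hlo : max (ka - 1 - max (m + 1) 0) 0 = ((t - N : Nat) : Int) := by omega
  rw [hhi, hlo, floordiv_tri, floordiv_tri, ← hNc]
  have mN := tri_mono (Nat.sub_le t N)
  simp only [Prod.mk.injEq]
  exact ⟨trivial, by omega⟩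

-- ===== VERDICT (by name: the statement is the Claim_ definition above) =====
theorem cnt_fredkin_stair_py_spec : Claim_equal_cnt_fredkin_stair_py := by
  intro ka kb _
  unfold Spec_cnt_fredkin_stair_py cnt_fredkin_stair_py cnt_fredkin_stair_py_alt
  simp only [core]
  by_cases h : ka = kb <;> simp [h]
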